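-- pv_equiv track=rewrite | github.com/primeqa/primeqa | primeqa/mrc/processors/preprocessors/base.py | _generate_previous_spans_per_example
-- ===== SOURCE A (Python) =====
-- import itertools
-- from typing import List, Iterable, Tuple, Any, Dict, Union
--
-- def _generate_previous_spans_per_example(example_idx: List[int], sample_mapping: List[int]) -> Iterable[int]:
--     """
--     Yields cumulative number of spans from previous examples.
--     """
--     group_start_idx = 0
--     for _, group in itertools.groupby(example_idx):
--         group_len = None
--         for group_len, _ in enumerate(group, 1):
--             pass
--         if group_len is None:  # this should never be triggered
--             raise ValueError("Unexpected group length None")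
--         yield from itertools.repeat(sample_mapping[group_start_idx], group_len)
--         group_start_idx += group_len
-- ===== SOURCE B (Python) =====
-- from typing import List, Iterable
--
-- def _generate_previous_spans_per_example(example_idx: List[int], sample_mapping: List[int]) -> Iterable[int]:
--     """Single flat pass: track the start index of the current run and yield
--     sample_mapping at that start index for every position."""
--     prev = None
--     group_start = 0
--     for i, v in enumerate(example_idx):
--         if prev is None or v != prev:
--             group_start = i
--         prev = v
--         yield sample_mapping[group_start]
-- ===== Notes on version B (the rewrite author's own statement) =====
-- stated objective: simpler
-- what changed: Replaced itertools.groupby with an inner length-counting loop plus itertools.repeat by a single flat enumerate pass that detects run boundaries (value != previous) and yields sample_mapping at the current run's start index.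
import Mathlib
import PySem

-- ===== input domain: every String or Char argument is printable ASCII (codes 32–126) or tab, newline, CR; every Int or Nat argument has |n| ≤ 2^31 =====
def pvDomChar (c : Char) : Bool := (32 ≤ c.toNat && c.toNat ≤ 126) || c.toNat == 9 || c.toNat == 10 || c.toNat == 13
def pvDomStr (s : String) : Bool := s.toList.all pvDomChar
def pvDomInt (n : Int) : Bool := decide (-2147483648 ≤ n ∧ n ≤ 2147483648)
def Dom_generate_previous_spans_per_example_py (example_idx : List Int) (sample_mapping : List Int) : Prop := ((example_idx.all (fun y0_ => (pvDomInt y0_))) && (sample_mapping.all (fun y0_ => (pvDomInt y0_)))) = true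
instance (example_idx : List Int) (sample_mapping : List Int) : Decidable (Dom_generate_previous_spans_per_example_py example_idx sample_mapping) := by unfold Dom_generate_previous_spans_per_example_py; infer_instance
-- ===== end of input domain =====

-- B replaces groupby + inner length-count + repeat by one flat boundary-tracking pass (objective: simpler).


-- ===== PORT A =====
-- itertools.groupby run extraction: length of the leading run equal to v, and the remainder.
def pvTakeRun (v : Int) : List Int → Nat × List Int
  | [] => (0, [])
  | x :: xs => if x = v then let p := pvTakeRun v xs; (p.1 + 1, p.2) else (0, x :: xs)

theorem pvTakeRun_rest_length (v : Int) : ∀ xs : List Int, (pvTakeRun v xs).2.length ≤ xs.length := by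
  intro xs
  induction xs with
  | nil => simp [pvTakeRun]
  | cons x xs ih =>
    by_cases h : x = v
    · simp [pvTakeRun, h]; omega
    · simp [pvTakeRun, h]

-- A's main loop: for each group, count its length, yield repeat(sample_mapping[group_start_idx], group_len),
-- advance group_start_idx.  sample_mapping[group_start_idx] is pyGetD with default 0; Pre_ excludes the
-- out-of-range (IndexError) inputs.
def pvALoop (sample_mapping : List Int) : List Int → Nat → List Int
  | [], _ => []
  | x :: xs, start =>
    let p := pvTakeRun x xs
    let group_len := p.1 + 1
    List.replicate group_len (PySem.List.pyGetD sample_mapping (start : Int) 0)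
      ++ pvALoop sample_mapping p.2 (start + group_len)
termination_by l _ => l.length
decreasing_by
  have := pvTakeRun_rest_length x xs
  simp; omega

def generate_previous_spans_per_example_py (example_idx : List Int) (sample_mapping : List Int) : List Int :=
  pvALoop sample_mapping example_idx 0

-- ===== PORT B =====
-- B's loop: index i, current group_start, prev value; at a boundary (prev none or v ≠ prev) set group_start := i;
-- yield sample_mapping[group_start] each step (pyGetD default 0; Pre_ excludes IndexError inputs).
def pvBLoop (sample_mapping : List Int) : List Int → Nat → Nat → Option Int → List Int
  | [], _, _, _ => []
  | v :: vs, i, group_start, prev =>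
    let gs : Nat := match prev with
      | none => i
      | some p => if v ≠ p then i else group_start
    PySem.List.pyGetD sample_mapping (gs : Int) 0 :: pvBLoop sample_mapping vs (i + 1) gs (some v)

def generate_previous_spans_per_example_py_alt (example_idx : List Int) (sample_mapping : List Int) : List Int :=
  pvBLoop sample_mapping example_idx 0 0 none

-- ===== PRECONDITION & SPEC =====
-- Pre_ excludes exactly the inputs where Python A raises IndexError: a run-start index of example_idx
-- that is not a valid index into sample_mapping (B raises the same IndexError there).
def Pre_generate_previous_spans_per_example_py (example_idx : List Int) (sample_mapping : List Int) : Prop :=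
  ∀ i, i < example_idx.length →
    (i = 0 ∨ example_idx.getD i 0 ≠ example_idx.getD (i - 1) 0) → i < sample_mapping.length
instance (example_idx : List Int) (sample_mapping : List Int) : Decidable (Pre_generate_previous_spans_per_example_py example_idx sample_mapping) := by unfold Pre_generate_previous_spans_per_example_py; infer_instance

def pvWitness_generate_previous_spans_per_example_py : List Int × List Int := ([1, 1, 2], [0, 0, 1])

def Spec_generate_previous_spans_per_example_py (example_idx : List Int) (sample_mapping : List Int) (out : List Int) : Prop := out = generate_previous_spans_per_example_py_alt example_idx sample_mapping
instance (example_idx : List Int) (sample_mapping : List Int) (out : List Int) : Decidable (Spec_generate_previous_spans_per_example_py example_idx sample_mapping out) := by unfold Spec_generate_previous_spans_per_example_py; infer_instance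

-- ===== CLAIM (what is proved, stated in full; the proofs are below) =====
def Claim_equal_generate_previous_spans_per_example_py : Prop := ∀ (example_idx : List Int) (sample_mapping : List Int), Dom_generate_previous_spans_per_example_py example_idx sample_mapping → Pre_generate_previous_spans_per_example_py example_idx sample_mapping → Spec_generate_previous_spans_per_example_py example_idx sample_mapping (generate_previous_spans_per_example_py example_idx sample_mapping)

-- ===== LEMMAS AND PROOFS =====

-- the remainder after a run does not start with the run's value
theorem pvTakeRun_rest_head (v : Int) : ∀ xs y ys, (pvTakeRun v xs).2 = y :: ys → y ≠ v := by
  intro xs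
  induction xs with
  | nil => intro y ys h; simp [pvTakeRun] at h
  | cons x xs ih =>
    intro y ys h
    by_cases hx : x = v
    · simp [pvTakeRun, hx] at h; exact ih y ys h
    · simp [pvTakeRun, hx] at h; rw [← h.1]; exact hx

-- within a run of value v, B keeps group_start fixed and emits the same element each step
theorem pvBLoop_run (sm : List Int) (v : Int) : ∀ (xs : List Int) (i g : Nat),
    pvBLoop sm xs i g (some v) =
      List.replicate (pvTakeRun v xs).1 (PySem.List.pyGetD sm (g : Int) 0)
        ++ pvBLoop sm (pvTakeRun v xs).2 (i + (pvTakeRun v xs).1) g (some v) := by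
  intro xs
  induction xs with
  | nil => intro i g; simp [pvTakeRun]
  | cons x xs ih =>
    intro i g
    by_cases hx : x = v
    · subst hx
      simp only [pvBLoop, pvTakeRun, ne_eq, not_true_eq_false, if_false]
      rw [ih (i + 1) g]
      have h1 : i + 1 + (pvTakeRun x xs).1 = i + ((pvTakeRun x xs).1 + 1) := by omega
      rw [h1]
      simp [List.replicate_succ]
    · simp [pvTakeRun, hx]

-- main correspondence: A's run-by-run loop equals B's boundary-tracking loop, whenever the pending
-- prev value (if any) differs from the head of the remaining list
theorem pvLoop_eq (sm : List Int) : ∀ (k : Nat) (l : List Int), l.length ≤ k →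
    ∀ (start g : Nat) (prev : Option Int),
      (∀ p y ys, prev = some p → l = y :: ys → y ≠ p) →
      pvALoop sm l start = pvBLoop sm l start g prev := by
  intro k
  induction k with
  | zero =>
    intro l hl start g prev _
    have : l = [] := List.length_eq_zero_iff.mp (Nat.le_zero.mp hl)
    subst this; simp [pvALoop, pvBLoop]
  | succ k ih =>
    intro l hl start g prev hprev
    cases l with
    | nil => simp [pvALoop, pvBLoop]
    | cons x xs =>
      have step : pvBLoop sm (x :: xs) start g prev =
          PySem.List.pyGetD sm (start : Int) 0 :: pvBLoop sm xs (start + 1) start (some x) := by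
        cases prev with
        | none => simp [pvBLoop]
        | some p =>
          have hne : x ≠ p := fun h => hprev p x xs rfl rfl h
          simp [pvBLoop, hne]
      rw [step, pvBLoop_run sm x xs (start + 1) start, pvALoop]
      have hrest := pvTakeRun_rest_length x xs
      rw [ih (pvTakeRun x xs).2 (by simp at hl; omega) (start + ((pvTakeRun x xs).1 + 1)) start (some x)
            (by intro p y ys hp hl'; cases hp; exact pvTakeRun_rest_head x xs y ys hl')]
      have h1 : start + 1 + (pvTakeRun x xs).1 = start + ((pvTakeRun x xs).1 + 1) := by omega
      rw [h1]
      simp [List.replicate_succ]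

-- ===== VERDICT (by name: the statement is the Claim_ definition above) =====
theorem generate_previous_spans_per_example_py_spec : Claim_equal_generate_previous_spans_per_example_py := by
  intro example_idx sample_mapping _ _
  unfold Spec_generate_previous_spans_per_example_py
  unfold generate_previous_spans_per_example_py generate_previous_spans_per_example_py_alt
  exact pvLoop_eq sample_mapping example_idx.length example_idx (le_refl _) 0 0 none
    (by intro p y ys h; cases h)
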